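-- pv_equiv track=rewrite | github.com/Issei-177013/Hiddify-Telegram-Bot | AdminBot/template.py | configs_template
-- ===== SOURCE A (Python) =====
-- def configs_template(configs):
--     messages = []
--     result = []
--     chunk_size = 5
--
--     for config in configs:
--         messages.append(f"<b>{config[1]}</b>\n<code>{config[0]}</code>\n")
--
--     for i in range(0, len(messages), chunk_size):
--         chunk = messages[i:i + chunk_size]
--         result.append("\n".join(chunk))
--     return result
-- ===== SOURCE B (Python) =====
-- def configs_template(configs):
--     if not configs:
--         return []
--     head, rest = configs[:5], configs[5:]
--     return ["\n".join(f"<b>{c[1]}</b>\n<code>{c[0]}</code>\n" for c in head)] + configs_template(rest)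
-- ===== Notes on version B (the rewrite author's own statement) =====
-- stated objective: simpler
-- what changed: Replaces the two-pass build (format every config into an intermediate messages list, then slice it by a range loop) with a direct structural recursion that takes the first 5 configs, formats and joins them, and recurses on the rest; no intermediate list and no index arithmetic.
import Mathlib
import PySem

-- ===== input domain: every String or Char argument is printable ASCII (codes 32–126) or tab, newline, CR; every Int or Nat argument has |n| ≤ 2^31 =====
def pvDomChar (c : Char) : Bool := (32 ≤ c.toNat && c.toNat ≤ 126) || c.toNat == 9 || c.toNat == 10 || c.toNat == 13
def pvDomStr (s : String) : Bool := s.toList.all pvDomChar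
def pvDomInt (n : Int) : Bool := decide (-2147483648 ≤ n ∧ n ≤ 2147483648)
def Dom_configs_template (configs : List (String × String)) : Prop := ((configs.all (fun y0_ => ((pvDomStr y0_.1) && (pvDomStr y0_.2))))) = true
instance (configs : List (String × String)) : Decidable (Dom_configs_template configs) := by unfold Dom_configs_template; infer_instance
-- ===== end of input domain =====

-- B replaces A's two passes (format all configs into an intermediate list, then slice it by index)
-- with one structural recursion on 5-element chunks of the input; objective: simpler.


-- the f-string '<b>{config[1]}</b>\n<code>{config[0]}</code>\n' shared by both Pythons
def pvFmt (c : String × String) : String :=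
  "<b>" ++ c.2 ++ "</b>\n<code>" ++ c.1 ++ "</code>\n"

-- ===== PORT A =====
def configs_template (configs : List (String × String)) : List String :=
  let messages := configs.foldl (fun acc config => acc ++ [pvFmt config]) []
  let result := (PySem.List.pyRange 0 (messages.length : Int) 5).foldl
    (fun acc i =>
      acc ++ [PySem.Str.join "\n" (PySem.List.slice messages (some i) (some (i + 5)))]) []
  result

-- ===== PORT B =====
def configs_template_alt : List (String × String) → List String
  | [] => []
  | c :: cs =>
    let head := PySem.List.slice (c :: cs) none (some 5)
    let rest := PySem.List.slice (c :: cs) (some 5) none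
    PySem.Str.join "\n" (head.map pvFmt) :: configs_template_alt rest
termination_by l => l.length
decreasing_by
  rw [PySem.List.slice_from _ (by norm_num : (0:Int) ≤ 5)]
  simp only [List.length_drop, List.length_cons]; omega

-- ===== PRECONDITION & SPEC =====
def Spec_configs_template (configs : List (String × String)) (out : List String) : Prop := out = configs_template_alt configs
instance (configs : List (String × String)) (out : List String) : Decidable (Spec_configs_template configs out) := by unfold Spec_configs_template; infer_instance

-- ===== CLAIM (what is proved, stated in full; the proofs are below) =====
def Claim_equal_configs_template : Prop := ∀ (configs : List (String × String)), Dom_configs_template configs → Spec_configs_template configs (configs_template configs)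

-- ===== LEMMAS AND PROOFS =====

-- chunk-and-join, the common shape of both programs (proof-side helper)
def pvChunk : List String → List String
  | [] => []
  | s :: rest => PySem.Str.join "\n" (List.take 5 (s :: rest)) :: pvChunk (List.drop 5 (s :: rest))
termination_by l => l.length
decreasing_by simp

-- normal form: the step-5 index range rewritten as chunk indices over List.range
theorem pvRange_form (m : List String) :
    (PySem.List.pyRange 0 ((m.length : Int)) 5).map
      (fun i => PySem.Str.join "\n" (PySem.List.slice m (some i) (some (i + 5))))
    = (List.range ((m.length + 4) / 5)).map
        (fun k => PySem.Str.join "\n" ((m.drop (5 * k)).take 5)) := by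
  rw [PySem.List.pyRange_of_pos 0 ((m.length : Int)) (by norm_num : (0:Int) < 5)]
  have hcnt : (if (0:Int) < (m.length : Int) then (((m.length : Int) - 0 + 5 - 1) / 5).toNat else 0)
      = (m.length + 4) / 5 := by
    split_ifs with h
    · have e : ((m.length : Int) - 0 + 5 - 1) = ((m.length + 4 : Nat) : Int) := by push_cast; ring
      rw [e]; omega
    · have : m.length = 0 := by omega
      simp [this]
  rw [hcnt, List.map_map]
  apply List.map_congr_left
  intro k _
  have e1 : ((0:Int) + 5 * (k : Int)) = ((5 * k : Nat) : Int) := by push_cast; ring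
  have e2 : ((5 * k : Nat) : Int) + 5 = ((5 * k + 5 : Nat) : Int) := by push_cast; ring
  simp only [Function.comp, e1, e2, PySem.List.slice_natCast]
  congr 2
  omega

-- chunk indices over List.range compute pvChunk
theorem pvRange_chunk : ∀ (n : Nat) (m : List String), m.length ≤ n →
    (List.range ((m.length + 4) / 5)).map
      (fun k => PySem.Str.join "\n" ((m.drop (5 * k)).take 5)) = pvChunk m := by
  intro n
  induction n with
  | zero =>
    intro m h
    have hm : m = [] := List.eq_nil_of_length_eq_zero (Nat.le_zero.mp h)
    subst hm; simp [pvChunk]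
  | succ n ih =>
    intro m h
    match m with
    | [] => simp [pvChunk]
    | s :: rest =>
      have hcnt : ((s :: rest).length + 4) / 5 = rest.length / 5 + 1 := by
        simp only [List.length_cons]; omega
      rw [hcnt, List.range_succ_eq_map, List.map_cons, List.map_map, pvChunk]
      refine congrArg₂ List.cons ?_ ?_
      · simp
      · have hlen' : (List.drop 4 rest).length ≤ n := by
          simp only [List.length_drop, List.length_cons] at *
          omega
        have := ih (List.drop 4 rest) hlen'
        have hcnt' : ((List.drop 4 rest).length + 4) / 5 = rest.length / 5 := by
          simp only [List.length_drop]; omega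
        rw [hcnt'] at this
        rw [show List.drop 5 (s :: rest) = List.drop 4 rest from rfl, ← this]
        apply List.map_congr_left
        intro k _
        show PySem.Str.join "\n" (List.take 5 (List.drop (5 * (k + 1)) (s :: rest)))
            = PySem.Str.join "\n" (List.take 5 (List.drop (5 * k) (List.drop 4 rest)))
        rw [List.drop_drop, show 5 * (k + 1) = (5 * k + 4) + 1 by ring, List.drop_succ_cons,
            show 5 * k + 4 = 4 + 5 * k by ring]

-- B computes pvChunk of the formatted list
theorem pvB_chunk : ∀ (n : Nat) (xs : List (String × String)), xs.length ≤ n →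
    configs_template_alt xs = pvChunk (xs.map pvFmt) := by
  intro n
  induction n with
  | zero =>
    intro xs h
    have hx : xs = [] := List.eq_nil_of_length_eq_zero (Nat.le_zero.mp h)
    subst hx; rw [configs_template_alt.eq_def]; simp [pvChunk]
  | succ n ih =>
    intro xs h
    match xs with
    | [] => rw [configs_template_alt.eq_def]; simp [pvChunk]
    | c :: cs =>
      have hlen' : (List.drop 5 (c :: cs)).length ≤ n := by
        simp only [List.length_drop, List.length_cons] at *
        omega
      have htake : PySem.List.slice (c :: cs) none (some 5) = List.take 5 (c :: cs) := by
        rw [PySem.List.slice_to _ (by norm_num : (0:Int) ≤ 5)]; rfl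
      have hdrop : PySem.List.slice (c :: cs) (some 5) none = List.drop 5 (c :: cs) := by
        rw [PySem.List.slice_from _ (by norm_num : (0:Int) ≤ 5)]; rfl
      have hne : List.map pvFmt (c :: cs) = pvFmt c :: List.map pvFmt cs := by simp
      rw [configs_template_alt.eq_def, hne, pvChunk.eq_def]
      simp only [htake, hdrop]
      rw [ih (List.drop 5 (c :: cs)) hlen', ← hne, List.map_take, List.map_drop]

-- ===== VERDICT (by name: the statement is the Claim_ definition above) =====
theorem configs_template_spec : Claim_equal_configs_template := by
  intro configs _
  show configs_template configs = configs_template_alt configs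
  unfold configs_template
  simp only [PySem.List.foldl_append_singleton_eq_map, List.nil_append]
  rw [pvRange_form, pvRange_chunk (configs.map pvFmt).length _ le_rfl,
      pvB_chunk configs.length _ le_rfl]
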